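-- pv_equiv track=rewrite | github.com/neozeno/programacion-en-python-uniandes | 01-programacion-en-python/M3/retos/hacer_la_vaca.py | encontrar_mayor_aportante
-- ===== SOURCE A (Python) =====
-- from typing import TypeAlias
--
-- Salon: TypeAlias = list[list[int]]
--
-- def encontrar_mayor_aportante(salon: Salon) -> tuple[int, int, int]:
--     """
--     Encuentra el estudiante que más dinero aportó y su posición en el salón.
--
--     Parámetros:
--         salon (Salon): Matriz con los aportes de cada estudiante.
--
--     Retorna:
--         tuple[int, int, int]: (monto_mayor, fila, columna) del mayor aportante.
--     """
--     mayor_aporte: int = 0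
--     fila_mayor_aportante: int = 0
--     columna_mayor_aportante: int = 0
--
--     for x in range(len(salon)):
--         for y in range(len(salon[x])):
--             if salon[x][y] > mayor_aporte:
--                 mayor_aporte = salon[x][y]
--                 fila_mayor_aportante = x
--                 columna_mayor_aportante = y
--
--     return mayor_aporte, fila_mayor_aportante, columna_mayor_aportante
-- ===== SOURCE B (Python) =====
-- def encontrar_mayor_aportante(salon):
--     # Phase 1: reduce each row to (row max value, column of its first occurrence); None for empty rows.
--     resumen = []
--     for fila in salon:
--         if fila:
--             m = max(fila)
--             resumen.append((m, fila.index(m)))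
--         else:
--             resumen.append(None)
--     # Phase 2: select the first row strictly improving on the 0 baseline.
--     mejor, fila_mejor, col_mejor = 0, 0, 0
--     for i, r in enumerate(resumen):
--         if r is not None and r[0] > mejor:
--             mejor, fila_mejor, col_mejor = r[0], i, r[1]
--     return mejor, fila_mejor, col_mejor
-- ===== Notes on version B (the rewrite author's own statement) =====
-- stated objective: alternative
-- what changed: Replaced the flat index-based nested scan with a two-phase row-reduce (per-row max via built-in max plus first-occurrence index) followed by a linear select over the per-row summaries.
import Mathlib
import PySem

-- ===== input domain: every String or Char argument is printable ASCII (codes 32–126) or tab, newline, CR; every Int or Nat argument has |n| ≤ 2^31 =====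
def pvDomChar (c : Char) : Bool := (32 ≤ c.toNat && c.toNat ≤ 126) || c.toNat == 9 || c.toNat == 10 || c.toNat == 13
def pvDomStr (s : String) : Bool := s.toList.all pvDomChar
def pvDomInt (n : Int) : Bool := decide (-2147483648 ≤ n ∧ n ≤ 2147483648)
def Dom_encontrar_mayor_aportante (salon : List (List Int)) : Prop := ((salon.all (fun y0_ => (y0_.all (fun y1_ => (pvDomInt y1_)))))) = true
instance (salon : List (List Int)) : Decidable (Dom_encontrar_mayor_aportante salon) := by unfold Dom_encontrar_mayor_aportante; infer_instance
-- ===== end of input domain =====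

-- B replaces A's flat nested index scan by a per-row max/argmax reduction followed by
-- a linear select over the row summaries (alternative decomposition, same results).

-- ===== PORT A =====
def encontrar_mayor_aportante (salon : List (List Int)) : Int × Int × Int :=
  (PySem.List.pyRange 0 (salon.length : Int) 1).foldl
    (fun st x =>
      (PySem.List.pyRange 0 ((PySem.List.pyGetD salon x []).length : Int) 1).foldl
        (fun st y =>
          if PySem.List.pyGetD (PySem.List.pyGetD salon x []) y 0 > st.1 then
            (PySem.List.pyGetD (PySem.List.pyGetD salon x []) y 0, x, y)
          else st)
        st)
    (0, 0, 0)

-- ===== PORT B =====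
-- per-row summary: (max value, column of its first occurrence), none for an empty row
def pvRowSummary (fila : List Int) : Option (Int × Int) :=
  match PySem.List.max? fila (fun y => y) with
  | none => none
  | some m => some (m, (((PySem.List.index? fila m).getD 0 : Nat) : Int))

def encontrar_mayor_aportante_alt (salon : List (List Int)) : Int × Int × Int :=
  (PySem.List.enumerate (salon.map pvRowSummary) 0).foldl
    (fun st p =>
      match p.2 with
      | none => st
      | some r => if r.1 > st.1 then (r.1, p.1, r.2) else st)
    (0, 0, 0)

-- ===== PRECONDITION & SPEC =====
def Spec_encontrar_mayor_aportante (salon : List (List Int)) (out : Int × Int × Int) : Prop := out = encontrar_mayor_aportante_alt salon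
instance (salon : List (List Int)) (out : Int × Int × Int) : Decidable (Spec_encontrar_mayor_aportante salon out) := by unfold Spec_encontrar_mayor_aportante; infer_instance

-- ===== CLAIM (what is proved, stated in full; the proofs are below) =====
def Claim_equal_encontrar_mayor_aportante : Prop := ∀ (salon : List (List Int)), Dom_encontrar_mayor_aportante salon → Spec_encontrar_mayor_aportante salon (encontrar_mayor_aportante salon)

-- ===== LEMMAS AND PROOFS =====

theorem pv_foldl_max_max (u : List Int) (a b : Int) :
    u.foldl max (max a b) = max a (u.foldl max b) := by
  induction u generalizing b with
  | nil => simp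
  | cons c u ih =>
      simp only [List.foldl_cons]
      rw [max_assoc, ih]

theorem pv_rowSummary_cons (v : Int) (t : List Int) :
    pvRowSummary (v :: t) =
      match pvRowSummary t with
      | none => some (v, 0)
      | some (m', c') => if v < m' then some (m', c' + 1) else some (v, 0) := by
  cases t with
  | nil =>
      simp [pvRowSummary, PySem.List.max?, PySem.List.index?_cons_self]
  | cons w u =>
      have hmax : PySem.List.max? (w :: u) (fun y => y) = some (u.foldl max w) :=
        PySem.List.max?_id_cons w u
      have hmax2 : PySem.List.max? (v :: w :: u) (fun y => y) =
          some (max v (u.foldl max w)) := by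
        rw [PySem.List.max?_id_cons]
        simp [pv_foldl_max_max]
      set m' : Int := u.foldl max w with hm'
      have hmem : m' ∈ (w :: u) := PySem.List.max?_mem hmax
      by_cases hv : v < m'
      · have hne : v ≠ m' := ne_of_lt hv
        obtain ⟨c, hc⟩ := Option.isSome_iff_exists.mp
          ((PySem.List.index?_isSome_iff (w :: u) m').mpr hmem)
        simp only [pvRowSummary, hmax, hmax2, max_eq_right (le_of_lt hv),
          PySem.List.index?_cons_of_ne (w :: u) hne, hc, Option.map_some, Option.getD_some]
        simp [hv]
      · have hle : m' ≤ v := le_of_not_gt hv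
        simp only [pvRowSummary, hmax, hmax2, max_eq_left hle,
          PySem.List.index?_cons_self, Option.getD_some]
        simp [hv]

theorem pv_inner_fold (x : Int) (row : List Int) :
    ∀ (s : Int) (st : Int × Int × Int),
      (PySem.List.enumerate row s).foldl
          (fun st p => if p.2 > st.1 then (p.2, x, p.1) else st) st =
        (match pvRowSummary row with
         | none => st
         | some r => if r.1 > st.1 then (r.1, x, s + r.2) else st) := by
  induction row with
  | nil => intro s st; simp [PySem.List.enumerate_nil, pvRowSummary, PySem.List.max?]
  | cons v t ih =>
      intro s st
      rw [PySem.List.enumerate_cons, List.foldl_cons, ih (s + 1), pv_rowSummary_cons]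
      cases h : pvRowSummary t with
      | none =>
          simp only []
          by_cases hv : v > st.1 <;> simp [hv]
      | some r =>
          obtain ⟨m', c'⟩ := r
          simp only []
          by_cases hvm : v < m'
          · simp only [if_pos hvm]
            by_cases hv : v > st.1
            · have h1 : m' > v := hvm
              rw [show s + 1 + c' = s + (c' + 1) from by ring]
              simp only [if_pos hv]
              rw [if_pos h1, if_pos (show m' > st.1 by omega)]
            · simp only [if_neg hv]
              by_cases h2 : m' > st.1
              · rw [if_pos h2, if_pos h2, show s + 1 + c' = s + (c' + 1) from by ring]
              · rw [if_neg h2, if_neg h2]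
          · simp only [if_neg hvm]
            have hle : m' ≤ v := le_of_not_gt hvm
            by_cases hv : v > st.1
            · have h2 : ¬ m' > v := not_lt.mpr hle
              simp [hv, h2]
            · have h2 : ¬ m' > st.1 := by omega
              simp [hv, h2]

theorem pv_enumerate_map {α β : Type} (f : α → β) (xs : List α) :
    ∀ (s : Int), PySem.List.enumerate (xs.map f) s =
      (PySem.List.enumerate xs s).map (fun p => (p.1, f p.2)) := by
  induction xs with
  | nil => intro s; simp [PySem.List.enumerate_nil]
  | cons a t ih =>
      intro s
      simp [PySem.List.enumerate_cons, ih (s + 1)]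

-- ===== VERDICT (by name: the statement is the Claim_ definition above) =====
theorem encontrar_mayor_aportante_spec : Claim_equal_encontrar_mayor_aportante := by
  intro salon _
  unfold Spec_encontrar_mayor_aportante encontrar_mayor_aportante encontrar_mayor_aportante_alt
  rw [pv_enumerate_map, List.foldl_map]
  rw [PySem.List.enumerate_eq_map_pyRange (d := ([] : List Int)), List.foldl_map]
  apply PySem.List.foldl_congr_mem
  intro st p _
  have h := pv_inner_fold p (PySem.List.pyGetD salon p []) 0 st
  rw [PySem.List.enumerate_eq_map_pyRange (d := (0 : Int)), List.foldl_map] at h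
  simp only [zero_add, PySem.List.len_eq] at h
  dsimp only
  rw [h]
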